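-- pv_equiv track=rewrite | github.com/techartorg/Advent_of_code_2021 | chris_cunningham/day_10.py | part_two
-- ===== SOURCE A (Python) =====
-- from typing import Iterable
--
-- def part_two(inputs: Iterable[list[str]]) -> int:
--     scores = []
--
--     for line in inputs:
--         result = 0
--
--         for c in reversed(line):
--             result *= 5
--             match c:
--                 case '(': result += 1
--                 case '[': result += 2
--                 case '{': result += 3
--                 case '<': result += 4
--         scores.append(result)
--
--     scores.sort()
--     return scores[len(scores) // 2]
-- ===== SOURCE B (Python) =====
-- _VAL = {'(': 1, '[': 2, '{': 3, '<': 4}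
--
--
-- def _select(xs, k):
--     # iterative quickselect: k-th smallest of xs (0-based), middle-element pivot
--     while True:
--         p = xs[len(xs) // 2]
--         lo = [x for x in xs if x < p]
--         if k < len(lo):
--             xs = lo
--             continue
--         hi = [x for x in xs if x > p]
--         if k < len(xs) - len(hi):
--             return p
--         k -= len(xs) - len(hi)
--         xs = hi
--
--
-- def part_two(inputs):
--     scores = [sum(_VAL.get(c, 0) * 5 ** i for i, c in enumerate(line)) for line in inputs]
--     return _select(scores, len(scores) // 2)
-- ===== Notes on version B (the rewrite author's own statement) =====
-- stated objective: alternative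
-- what changed: scores are computed as a positional power-of-5 sum over enumerate (instead of a reversed Horner loop) and the median is found by an iterative quickselect partition loop instead of fully sorting the list and indexing.
import Mathlib
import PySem

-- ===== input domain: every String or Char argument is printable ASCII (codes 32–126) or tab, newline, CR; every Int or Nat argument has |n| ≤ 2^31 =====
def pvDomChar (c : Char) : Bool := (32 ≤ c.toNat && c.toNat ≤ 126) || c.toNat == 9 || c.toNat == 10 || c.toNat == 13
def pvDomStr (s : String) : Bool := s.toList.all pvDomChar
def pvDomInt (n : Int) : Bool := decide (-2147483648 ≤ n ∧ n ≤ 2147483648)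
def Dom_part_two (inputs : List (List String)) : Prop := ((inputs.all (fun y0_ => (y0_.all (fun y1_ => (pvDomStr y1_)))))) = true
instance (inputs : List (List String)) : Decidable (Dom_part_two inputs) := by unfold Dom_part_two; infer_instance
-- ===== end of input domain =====

-- B scores each line by a positional power-of-5 sum over enumerate and finds the median by an
-- iterative quickselect partition loop instead of sorting (objective: alternative algorithm).

-- ===== PORT A =====
-- the inner per-line loop of A: Horner accumulation over reversed(line)
def pvScoreA (line : List String) : Int :=
  line.reverse.foldl (fun result c =>
    let result := result * 5
    if c = "(" then result + 1
    else if c = "[" then result + 2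
    else if c = "{" then result + 3
    else if c = "<" then result + 4
    else result) 0

def part_two (inputs : List (List String)) : Int :=
  let scores := inputs.foldl (fun acc line => acc ++ [pvScoreA line]) []
  let scores := PySem.List.sorted scores (fun x => x) false
  match PySem.List.pyGet? scores (PySem.Int.floordiv (scores.length : Int) 2) with
  | some v => v
  | none => 0    -- unreachable under Pre_ (Python raises IndexError on empty inputs)

-- ===== PORT B =====
def pvVal : PySem.Dict String Int :=
  PySem.Dict.ofList [("(", 1), ("[", 2), ("{", 3), ("<", 4)]

-- Source B's score: `5 ** i` on the non-negative enumerate index is ported as `5 ^ i.toNat` (exact: i ≥ 0)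
def pvScore (line : List String) : Int :=
  ((PySem.List.enumerate line 0).map (fun ic => pvVal.getD ic.2 0 * 5 ^ ic.1.toNat)).sum

-- Source B's `while True` partition loop of _select, as tail recursion; k = len//2 ≥ 0 is a Nat
def pvSelect (xs : List Int) (k : Nat) : Int :=
  match hxs : xs with
  | [] => 0    -- unreachable under Pre_ (Python raises IndexError on empty xs)
  | a :: t =>
    let p := (a :: t)[(a :: t).length / 2]'(by exact Nat.div_lt_self (by simp) (by omega))
    let lo := (a :: t).filter (fun x => decide (x < p))
    if k < lo.length then pvSelect lo k
    else
      let hi := (a :: t).filter (fun x => decide (p < x))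
      if k < (a :: t).length - hi.length then p
      else pvSelect hi (k - ((a :: t).length - hi.length))
termination_by xs.length
decreasing_by
  · exact List.length_filter_lt_length_iff_exists.mpr
      ⟨(a :: t)[(a :: t).length / 2]'(Nat.div_lt_self (by simp) (by omega)), List.getElem_mem _, by simp⟩
  · exact List.length_filter_lt_length_iff_exists.mpr
      ⟨(a :: t)[(a :: t).length / 2]'(Nat.div_lt_self (by simp) (by omega)), List.getElem_mem _, by simp⟩

def part_two_alt (inputs : List (List String)) : Int :=
  let scores := inputs.map pvScore
  pvSelect scores (scores.length / 2)

-- ===== PRECONDITION & SPEC =====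
-- A raises IndexError (indexing the empty scores list) when inputs is empty; excluded.
def Pre_part_two (inputs : List (List String)) : Prop := inputs ≠ []
instance (inputs : List (List String)) : Decidable (Pre_part_two inputs) := by
  unfold Pre_part_two; infer_instance

def pvWitness_part_two : List (List String) := [["("], []]

def Spec_part_two (inputs : List (List String)) (out : Int) : Prop := out = part_two_alt inputs
instance (inputs : List (List String)) (out : Int) : Decidable (Spec_part_two inputs out) := by
  unfold Spec_part_two; infer_instance

-- ===== CLAIM (what is proved, stated in full; the proofs are below) =====
def Claim_equal_part_two : Prop := ∀ (inputs : List (List String)), Dom_part_two inputs → Pre_part_two inputs → Spec_part_two inputs (part_two inputs)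

-- ===== LEMMAS AND PROOFS =====

-- A's match-statement value of a character equals B's dict lookup
lemma val_eq (c : String) :
    (if c = "(" then (1:Int) else if c = "[" then 2 else if c = "{" then 3
     else if c = "<" then 4 else 0) = pvVal.getD c 0 := by
  have h : pvVal = PySem.Dict.mk [("(", 1), ("[", 2), ("{", 3), ("<", 4)] := by decide
  rw [h]
  simp only [PySem.Dict.getD, PySem.Dict.get?_mk_cons, beq_iff_eq]
  by_cases h1 : c = "(" <;> by_cases h2 : c = "[" <;> by_cases h3 : c = "{" <;> by_cases h4 : c = "<" <;>
    simp_all [eq_comm, PySem.Dict.get?]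

-- A's reversed Horner loop equals B's positional power sum
lemma horner_eq (line : List String) (a : Int) :
    line.reverse.foldl (fun result c =>
      let result := result * 5
      if c = "(" then result + 1
      else if c = "[" then result + 2
      else if c = "{" then result + 3
      else if c = "<" then result + 4
      else result) a
    = a * 5 ^ line.length + pvScore line := by
  induction line using List.reverseRecOn generalizing a with
  | nil => simp [pvScore, PySem.List.enumerate]
  | append_singleton t c ih =>
    rw [List.reverse_append]
    simp only [List.reverse_singleton, List.singleton_append, List.foldl_cons]
    rw [ih]
    simp only [pvScore, PySem.List.enumerate_append]
    rw [List.map_append, List.sum_append]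
    have henum : PySem.List.enumerate [c] (0 + (t.length : Int)) = [((t.length : Int), c)] := by
      simp [PySem.List.enumerate_cons, PySem.List.enumerate_nil]
    rw [henum]
    have hval := val_eq c
    simp only [List.map_cons, List.map_nil, List.sum_cons, List.sum_nil, List.length_append,
      List.length_singleton, Int.toNat_natCast]
    rw [← hval]
    split_ifs <;> ring

lemma pvSelect_mem (xs : List Int) (k : Nat) (hk : k < xs.length) : pvSelect xs k ∈ xs := by
  fun_induction pvSelect xs k with
  | case1 => simp at hk
  | case2 k a t p lo h ih =>
    exact List.mem_of_mem_filter (ih h)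
  | case3 => exact List.getElem_mem _
  | case4 k a t p lo h1 hi h2 ih =>
    have hle : hi.length ≤ (a :: t).length := List.length_filter_le _ _
    exact List.mem_of_mem_filter (ih (by omega))

-- counting a predicate over a partition of the list (cited perm/countP lemmas)
lemma countP_split (l : List Int) (q r : Int → Bool) :
    l.countP q = (l.filter r).countP q + (l.filter (fun x => !r x)).countP q := by
  have h := (List.filter_append_perm r l).countP_eq q
  rw [← h, List.countP_append]

-- pvSelect returns THE k-th smallest: count characterisation
lemma pvSelect_count (xs : List Int) (k : Nat) (hk : k < xs.length) :
    xs.countP (fun x => decide (x < pvSelect xs k)) ≤ k ∧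
    k < xs.countP (fun x => decide (x ≤ pvSelect xs k)) := by
  fun_induction pvSelect xs k with
  | case1 => simp at hk
  | case2 k a t p lo h ih =>
    have hlodef : lo = (a :: t).filter (fun x => decide (x < p)) := rfl
    have hv : pvSelect lo k ∈ lo := pvSelect_mem lo k h
    have hvp : pvSelect lo k < p := by
      have := List.mem_filter.mp hv
      simpa using this.2
    obtain ⟨ih1, ih2⟩ := ih h
    set v := pvSelect lo k with hvdef
    have e1 : (a :: t).countP (fun x => decide (x < v)) = lo.countP (fun x => decide (x < v)) := by
      rw [countP_split (a :: t) _ (fun x => decide (x < p)), ← hlodef]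
      have hz : ((a :: t).filter (fun x => !decide (x < p))).countP (fun x => decide (x < v)) = 0 := by
        rw [List.countP_eq_zero]
        intro x hx
        have := List.mem_filter.mp hx
        simp at this ⊢
        omega
      omega
    have e2 : (a :: t).countP (fun x => decide (x ≤ v)) = lo.countP (fun x => decide (x ≤ v)) := by
      rw [countP_split (a :: t) _ (fun x => decide (x < p)), ← hlodef]
      have hz : ((a :: t).filter (fun x => !decide (x < p))).countP (fun x => decide (x ≤ v)) = 0 := by
        rw [List.countP_eq_zero]
        intro x hx
        have := List.mem_filter.mp hx
        simp at this ⊢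
        omega
      omega
    exact ⟨by omega, by omega⟩
  | case3 k a t p lo h1 hi h2 =>
    have hlo : lo.length = (a :: t).countP (fun x => decide (x < p)) :=
      List.countP_eq_length_filter.symm
    have hhi : hi.length = (a :: t).countP (fun x => decide (p < x)) :=
      List.countP_eq_length_filter.symm
    have hsplit := countP_split (a :: t) (fun x => decide (x ≤ p)) (fun x => decide (p < x))
    have hz : ((a :: t).filter (fun x => decide (p < x))).countP (fun x => decide (x ≤ p)) = 0 := by
      rw [List.countP_eq_zero]
      intro x hx
      have := List.mem_filter.mp hx
      simp at this ⊢
      omega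
    have hfull : ((a :: t).filter (fun x => !decide (p < x))).countP (fun x => decide (x ≤ p))
        = ((a :: t).filter (fun x => !decide (p < x))).length := by
      rw [List.countP_eq_length]
      intro x hx
      have := List.mem_filter.mp hx
      simp at this ⊢
      omega
    have hlen := (List.filter_append_perm (fun x => decide (p < x)) (a :: t)).length_eq
    rw [List.length_append] at hlen
    rw [hlo] at h1
    rw [hhi] at h2
    have hdf : (a :: t).countP (fun x => decide (p < x))
        = ((a :: t).filter (fun x => decide (p < x))).length := List.countP_eq_length_filter
    omega
  | case4 k a t p lo h1 hi h2 ih =>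
    have hhidef : hi = (a :: t).filter (fun x => decide (p < x)) := rfl
    have hhil : hi.length ≤ (a :: t).length := List.length_filter_le _ _
    have hk' : k - ((a :: t).length - hi.length) < hi.length := by omega
    obtain ⟨ih1, ih2⟩ := ih hk'
    have hv : pvSelect hi (k - ((a :: t).length - hi.length)) ∈ hi := pvSelect_mem _ _ hk'
    have hvp : p < pvSelect hi (k - ((a :: t).length - hi.length)) := by
      have := List.mem_filter.mp hv
      simpa using this.2
    set v := pvSelect hi (k - ((a :: t).length - hi.length)) with hvdef
    have hsplit := countP_split (a :: t) (fun x => decide (x < v)) (fun x => decide (p < x))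
    have hsplit2 := countP_split (a :: t) (fun x => decide (x ≤ v)) (fun x => decide (p < x))
    have hfull1 : ((a :: t).filter (fun x => !decide (p < x))).countP (fun x => decide (x < v))
        = ((a :: t).filter (fun x => !decide (p < x))).length := by
      rw [List.countP_eq_length]
      intro x hx
      have := List.mem_filter.mp hx
      simp at this ⊢
      omega
    have hfull2 : ((a :: t).filter (fun x => !decide (p < x))).countP (fun x => decide (x ≤ v))
        = ((a :: t).filter (fun x => !decide (p < x))).length := by
      rw [List.countP_eq_length]
      intro x hx
      have := List.mem_filter.mp hx
      simp at this ⊢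
      omega
    have hlen := (List.filter_append_perm (fun x => decide (p < x)) (a :: t)).length_eq
    rw [List.length_append] at hlen
    rw [← hhidef] at hsplit hsplit2 hlen
    omega

-- count characterisation of the k-th element of a ≤-sorted list
lemma sorted_count (s : List Int) (v : Int) (hs : s.Pairwise (· ≤ ·)) (k : Nat)
    (hk : k < s.length) (hkv : s[k] = v) :
    s.countP (fun x => decide (x < v)) ≤ k ∧ k < s.countP (fun x => decide (x ≤ v)) := by
  induction s generalizing k with
  | nil => simp at hk
  | cons b t ih =>
    rw [List.pairwise_cons] at hs
    obtain ⟨hb, ht⟩ := hs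
    cases k with
    | zero =>
      simp only [List.getElem_cons_zero] at hkv
      subst hkv
      constructor
      · have hz : (b :: t).countP (fun x => decide (x < b)) = 0 := by
          rw [List.countP_eq_zero]
          intro x hx
          rcases List.mem_cons.mp hx with rfl | hx
          · simp
          · have := hb x hx
            simp
            omega
        omega
      · rw [List.countP_cons]
        simp
    | succ n =>
      have hn : n < t.length := by simpa using hk
      have hkv' : t[n] = v := by simpa using hkv
      obtain ⟨ih1, ih2⟩ := ih ht n hn hkv'
      have hbv : b ≤ v := hkv' ▸ hb _ (List.getElem_mem hn)
      rw [List.countP_cons, List.countP_cons]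
      constructor
      · split_ifs <;> omega
      · split_ifs with h <;> simp_all

-- uniqueness: the count characterisation pins the value
lemma count_unique (xs : List Int) (k : Nat) (v w : Int)
    (hv : xs.countP (fun x => decide (x < v)) ≤ k ∧ k < xs.countP (fun x => decide (x ≤ v)))
    (hw : xs.countP (fun x => decide (x < w)) ≤ k ∧ k < xs.countP (fun x => decide (x ≤ w))) :
    v = w := by
  rcases lt_trichotomy v w with h | h | h
  · exfalso
    have h1 : xs.countP (fun x => decide (x ≤ v)) ≤ xs.countP (fun x => decide (x < w)) :=
      List.countP_mono_left (fun x _ hx => by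
        simp only [decide_eq_true_eq] at *; omega)
    omega
  · exact h
  · exfalso
    have h1 : xs.countP (fun x => decide (x ≤ w)) ≤ xs.countP (fun x => decide (x < v)) :=
      List.countP_mono_left (fun x _ hx => by
        simp only [decide_eq_true_eq] at *; omega)
    omega

-- quickselect = sorted-then-index
lemma pvSelect_eq_sorted (xs : List Int) (k : Nat) (hk : k < xs.length) :
    pvSelect xs k
      = (PySem.List.sorted xs (fun x => x) false)[k]'(by
          simpa [PySem.List.length_sorted] using hk) := by
  have hperm : (PySem.List.sorted xs (fun x => x) false).Perm xs :=
    PySem.List.sorted_perm xs (fun x => x) false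
  have hs := sorted_count (PySem.List.sorted xs (fun x => x) false) _
    (by simpa using PySem.List.sorted_pairwise (xs := xs) (key := fun x => x))
    k (by simpa [PySem.List.length_sorted] using hk) rfl
  have hp := pvSelect_count xs k hk
  refine count_unique xs k _ _ hp ⟨?_, ?_⟩
  · calc _ = _ := (hperm.countP_eq _).symm
    _ ≤ k := hs.1
  · calc k < _ := hs.2
    _ = _ := hperm.countP_eq _

-- ===== VERDICT (by name: the statement is the Claim_ definition above) =====
theorem part_two_spec : Claim_equal_part_two := by
  intro inputs _ hpre
  unfold Spec_part_two part_two part_two_alt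
  simp only [PySem.List.foldl_append_singleton_eq_map, List.nil_append]
  have hmap : inputs.map pvScoreA = inputs.map pvScore := by
    refine List.map_congr_left (fun line _ => ?_)
    have := horner_eq line 0
    simpa [pvScoreA] using this
  rw [hmap]
  have hne : inputs.map pvScore ≠ [] := by
    simpa using hpre
  have hpos : 0 < (inputs.map pvScore).length := List.length_pos_of_ne_nil hne
  have hslen : (PySem.List.sorted (inputs.map pvScore) (fun x => x) false).length
      = (inputs.map pvScore).length := PySem.List.length_sorted _ _ _
  have hik : (inputs.map pvScore).length / 2 < (inputs.map pvScore).length :=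
    Nat.div_lt_self hpos (by omega)
  have hfd : PySem.Int.floordiv
      (((PySem.List.sorted (inputs.map pvScore) (fun x => x) false).length : Nat) : Int) 2
      = (((PySem.List.sorted (inputs.map pvScore) (fun x => x) false).length / 2 : Nat) : Int) := by
    exact_mod_cast PySem.Int.floordiv_natCast _ 2
  rw [hfd, PySem.List.pyGet?_natCast, hslen]
  rw [List.getElem?_eq_getElem (by omega)]
  exact (pvSelect_eq_sorted (inputs.map pvScore) ((inputs.map pvScore).length / 2) hik).symm
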